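-- pv_equiv track=rewrite | github.com/S3nna13/Aurelius | src/security/threat_intel_correlator.py | cluster_hashes
-- ===== SOURCE A (Python) =====
-- from collections import defaultdict
--
-- def cluster_hashes(hash_list: list[str]) -> dict[str, list[str]]:
--     buckets: dict[str, list[str]] = defaultdict(list)
--     for h in hash_list:
--         if not h:
--             continue
--         v = h.strip().lower()
--         if not all(ch in "0123456789abcdef" for ch in v):
--             family = "unknown"
--         else:
--             n = len(v)
--             family = {
--                 32: "md5",
--                 40: "sha1",
--                 64: "sha256",
--                 128: "sha512",
--             }.get(n, "unknown")
--         buckets[family].append(v)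
--     out: dict[str, list[str]] = {}
--     for k in sorted(buckets):
--         out[k] = sorted(set(buckets[k]))
--     return out
-- ===== SOURCE B (Python) =====
-- def _family(v: str) -> str:
--     if any(ch not in "0123456789abcdef" for ch in v):
--         return "unknown"
--     n = len(v)
--     if n == 32:
--         return "md5"
--     if n == 40:
--         return "sha1"
--     if n == 64:
--         return "sha256"
--     if n == 128:
--         return "sha512"
--     return "unknown"
--
--
-- def cluster_hashes(hash_list: list[str]) -> dict[str, list[str]]:
--     vals = sorted({h.strip().lower() for h in hash_list if h})
--     fams = sorted({_family(v) for v in vals})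
--     return {k: [v for v in vals if _family(v) == k] for k in fams}
-- ===== Notes on version B (the rewrite author's own statement) =====
-- stated objective: alternative
-- what changed: Instead of accumulating per-family buckets in a defaultdict and then sorting/deduping each bucket, B dedups and sorts the cleaned values once globally and emits each family's bucket as a single filter pass over that sorted sequence, so no per-bucket set/sort is needed.
import Mathlib
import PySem

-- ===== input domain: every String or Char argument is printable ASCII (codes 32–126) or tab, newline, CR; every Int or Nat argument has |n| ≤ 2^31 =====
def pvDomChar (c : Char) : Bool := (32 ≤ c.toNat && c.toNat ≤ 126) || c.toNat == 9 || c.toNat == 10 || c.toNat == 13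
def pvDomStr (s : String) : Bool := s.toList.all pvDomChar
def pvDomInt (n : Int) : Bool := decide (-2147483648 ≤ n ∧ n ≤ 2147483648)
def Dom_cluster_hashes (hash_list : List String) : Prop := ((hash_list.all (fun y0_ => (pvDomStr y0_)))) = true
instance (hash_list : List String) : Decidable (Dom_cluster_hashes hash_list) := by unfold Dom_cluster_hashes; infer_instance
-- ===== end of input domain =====

-- B groups by one global dedup+sort followed by a per-family filter instead of A's defaultdict accumulation with per-bucket set+sort; same results (objective: alternative decomposition).

-- ===== PORT A =====
def cluster_hashes (hash_list : List String) : List (String × List String) :=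
  let buckets := hash_list.foldl (fun d h =>
    if h = "" then d
    else
      let v := PySem.Str.lower (PySem.Str.strip h)
      let family :=
        if !(v.toList.all (fun ch => ("0123456789abcdef".toList).contains ch)) then "unknown"
        else
          let n := PySem.Str.len v
          (PySem.Dict.ofList [((32 : Int), "md5"), (40, "sha1"), (64, "sha256"), (128, "sha512")]).getD n "unknown"
      d.modify family [] (· ++ [v])) PySem.Dict.empty
  let out := (PySem.List.sorted buckets.keys (fun k => k) false).foldl
    (fun d k => d.insert k (PySem.List.sorted (PySem.Set.ofList (buckets.getD k [])) (fun x => x) false))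
    PySem.Dict.empty
  out.items

-- ===== PORT B =====
def pyFamily (v : String) : String :=
  if v.toList.any (fun ch => !("0123456789abcdef".toList).contains ch) then "unknown"
  else
    let n := PySem.Str.len v
    if n = 32 then "md5"
    else if n = 40 then "sha1"
    else if n = 64 then "sha256"
    else if n = 128 then "sha512"
    else "unknown"

def cluster_hashes_alt (hash_list : List String) : List (String × List String) :=
  let vals := PySem.List.sorted
    (PySem.Set.ofList ((hash_list.filter (fun h => h != "")).map
      (fun h => PySem.Str.lower (PySem.Str.strip h)))) (fun x => x) false
  let fams := PySem.List.sorted (PySem.Set.ofList (vals.map pyFamily)) (fun x => x) false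
  fams.map (fun k => (k, vals.filter (fun v => pyFamily v == k)))

-- ===== PRECONDITION & SPEC =====
def Spec_cluster_hashes (hash_list : List String) (out : List (String × List String)) : Prop := out = cluster_hashes_alt hash_list
instance (hash_list : List String) (out : List (String × List String)) : Decidable (Spec_cluster_hashes hash_list out) := by unfold Spec_cluster_hashes; infer_instance

-- ===== CLAIM (what is proved, stated in full; the proofs are below) =====
def Claim_equal_cluster_hashes : Prop := ∀ (hash_list : List String), Dom_cluster_hashes hash_list → Spec_cluster_hashes hash_list (cluster_hashes hash_list)

-- ===== LEMMAS AND PROOFS =====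

-- helper definitions and lemmas used only by the proofs
def pvVals (hash_list : List String) : List String :=
  (hash_list.filter (fun h => h != "")).map (fun h => PySem.Str.lower (PySem.Str.strip h))

def pvFamA (v : String) : String :=
  if !(v.toList.all (fun ch => ("0123456789abcdef".toList).contains ch)) then "unknown"
  else
    let n := PySem.Str.len v
    (PySem.Dict.ofList [((32 : Int), "md5"), (40, "sha1"), (64, "sha256"), (128, "sha512")]).getD n "unknown"

theorem pv_any_not_all {α : Type} (l : List α) (p : α → Bool) :
    (l.any fun x => !p x) = !l.all p := by
  induction l with
  | nil => rfl
  | cons a t ih => simp [List.any_cons, List.all_cons, ih, Bool.not_and]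

theorem pv_lit_getD (n : Int) :
    (PySem.Dict.ofList [((32 : Int), "md5"), (40, "sha1"), (64, "sha256"), (128, "sha512")]).getD n "unknown"
      = if n = 32 then "md5"
        else if n = 40 then "sha1"
        else if n = 64 then "sha256"
        else if n = 128 then "sha512" else "unknown" := by
  have h : PySem.Dict.ofList [((32 : Int), "md5"), (40, "sha1"), (64, "sha256"), (128, "sha512")]
      = PySem.Dict.mk [((32 : Int), "md5"), (40, "sha1"), (64, "sha256"), (128, "sha512")] := by decide
  rw [h]
  simp only [PySem.Dict.getD, PySem.Dict.get?_mk_cons]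
  split_ifs <;> simp_all <;> rfl

theorem pvFamA_eq : pvFamA = pyFamily := by
  funext v
  unfold pvFamA pyFamily
  rw [pv_any_not_all, pv_lit_getD]

theorem pvVals_cons (h : String) (t : List String) :
    pvVals (h :: t)
      = if h = "" then pvVals t
        else PySem.Str.lower (PySem.Str.strip h) :: pvVals t := by
  by_cases hh : h = "" <;> simp [pvVals, hh]

theorem pvFoldA_eq (hs : List String) (d : PySem.Dict String (List String)) :
    hs.foldl (fun d h =>
      if h = "" then d
      else
        let v := PySem.Str.lower (PySem.Str.strip h)
        let family :=
          if !(v.toList.all (fun ch => ("0123456789abcdef".toList).contains ch)) then "unknown"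
          else
            let n := PySem.Str.len v
            (PySem.Dict.ofList [((32 : Int), "md5"), (40, "sha1"), (64, "sha256"), (128, "sha512")]).getD n "unknown"
        d.modify family [] (· ++ [v])) d
      = ((pvVals hs).map (fun v => (pvFamA v, v))).foldl
          (fun d p => d.modify p.1 [] (· ++ [p.2])) d := by
  induction hs generalizing d with
  | nil => rfl
  | cons h t ih =>
    rw [List.foldl_cons, pvVals_cons]
    by_cases hh : h = ""
    · rw [if_pos hh, if_pos hh, ih]
    · rw [if_neg hh, if_neg hh, List.map_cons, List.foldl_cons, ih]
      simp only [pvFamA]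

theorem pvGetD_buckets (hs : List String) (k : String) :
    (((pvVals hs).map (fun v => (pvFamA v, v))).foldl
        (fun d p => d.modify p.1 [] (· ++ [p.2])) PySem.Dict.empty).getD k []
      = (pvVals hs).filter (fun v => pvFamA v == k) := by
  rw [PySem.Dict.getD_foldl_modify_append]
  simp [PySem.Dict.getD, PySem.Dict.get?, PySem.Dict.empty, List.filter_map, Function.comp_def]

theorem pvKeys_buckets (hs : List String) :
    (((pvVals hs).map (fun v => (pvFamA v, v))).foldl
        (fun d p => d.modify p.1 [] (· ++ [p.2])) PySem.Dict.empty).keys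
      = PySem.Set.ofList ((pvVals hs).map pvFamA) := by
  rw [PySem.Dict.keys_foldl_modify_key]
  simp [PySem.Set.update_nil_left, List.map_map, Function.comp_def]


theorem pvVals_nodup (L : List String) :
    (PySem.List.sorted (PySem.Set.ofList L) (fun x => x) false).Nodup :=
  ((PySem.List.sorted_perm _ _ _).nodup_iff).mpr (PySem.Set.nodup_ofList L)

theorem pvFams_eq (L : List String) :
    PySem.List.sorted (PySem.Set.ofList (L.map pyFamily)) (fun x => x) false
      = PySem.List.sorted
          (PySem.Set.ofList ((PySem.List.sorted (PySem.Set.ofList L) (fun x => x) false).map pyFamily))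
          (fun x => x) false := by
  apply PySem.List.sorted_eq_sorted_of_perm _ _ _ (fun a b h => h)
  apply (List.perm_ext_iff_of_nodup (PySem.Set.nodup_ofList _) (PySem.Set.nodup_ofList _)).mpr
  intro x
  simp [PySem.Set.mem_ofList, List.mem_map, PySem.List.mem_sorted]

theorem pvBucket_eq (L : List String) (k : String) :
    PySem.List.sorted (PySem.Set.ofList (L.filter (fun v => pyFamily v == k))) (fun x => x) false
      = (PySem.List.sorted (PySem.Set.ofList L) (fun x => x) false).filter
          (fun v => pyFamily v == k) := by
  apply PySem.List.sorted_eq_of_perm_of_pairwise_lt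
  · apply (List.perm_ext_iff_of_nodup ((pvVals_nodup L).filter _) (PySem.Set.nodup_ofList _)).mpr
    intro x
    simp [PySem.Set.mem_ofList, PySem.List.mem_sorted, List.mem_filter]
  · exact (PySem.List.sorted_ofList_pairwise_lt L).filter _

-- ===== VERDICT (by name: the statement is the Claim_ definition above) =====
theorem cluster_hashes_spec : Claim_equal_cluster_hashes := by
  intro hs _
  unfold Spec_cluster_hashes cluster_hashes cluster_hashes_alt
  rw [pvFoldA_eq]
  have hv : (hs.filter (fun h => h != "")).map (fun h => PySem.Str.lower (PySem.Str.strip h))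
      = pvVals hs := rfl
  rw [hv]
  simp only []
  rw [pvKeys_buckets]
  rw [PySem.Dict.items_foldl_insert_fresh]
  · simp only [pvGetD_buckets]
    simp only [pvFamA_eq, PySem.Dict.empty, List.nil_append]
    rw [← pvFams_eq]
    refine List.map_congr_left fun k _ => ?_
    rw [pvBucket_eq]
  · intro a _
    rfl
  · exact List.map_id _ ▸ ((PySem.List.sorted_perm _ _ _).nodup_iff).mpr
      (PySem.Set.nodup_ofList _)
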